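-- pv_equiv track=rewrite | github.com/keeka2/algorithm_study | code/star_soyeol.py | solution
-- ===== SOURCE A (Python) =====
-- def solution(a):
--     num_index = {}
--     num_list = []
--     for i in range(len(a)):
--         if a[i] in num_index:
--             num_index[a[i]]["idx_list"].append(i)
--             num_index[a[i]]["count"] += 1
--         else:
--             num_index[a[i]] = {"idx_list": [], "count": 0}
--             num_index[a[i]]["idx_list"].append(i)
--             num_index[a[i]]["count"] += 1
--
--     for n in num_index:
--         num_list.append([n, num_index[n]["idx_list"], num_index[n]["count"]])
--
--     num_list.sort(key=lambda x:x[2])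
--     ret_answer = 0
--     while num_list:
--         cur_list = num_list.pop()
--         number, index_list, count = cur_list[0], cur_list[1], cur_list[2]
--         if ret_answer >= count * 2:
--             break
--         visited_index = {-1:True, len(a):True}
--         answer = 0
--         for index in index_list:
--             left = index - 1
--             right = index + 1
--             if left not in visited_index and a[left] != number:
--                 answer += 2
--                 visited_index[left] = True
--             elif right not in visited_index and a[right] != number:
--                 answer += 2
--                 visited_index[right] = True
--             else:
--                 pass
--         ret_answer = max(ret_answer, answer)
--
--     return ret_answer
-- ===== SOURCE B (Python) =====
-- def _gain(a, v, idxs):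
--     visited = {-1, len(a)}
--     gain = 0
--     for i in idxs:
--         if i - 1 not in visited and a[i - 1] != v:
--             gain += 2
--             visited.add(i - 1)
--         elif i + 1 not in visited and a[i + 1] != v:
--             gain += 2
--             visited.add(i + 1)
--     return gain
--
--
-- def solution(a):
--     groups = {}
--     for i, v in enumerate(a):
--         groups.setdefault(v, []).append(i)
--     best = 0
--     for v, idxs in groups.items():
--         best = max(best, _gain(a, v, idxs))
--     return best
-- ===== Notes on version B (the rewrite author's own statement) =====
-- stated objective: simpler
-- what changed: B drops A's sort-by-count and descending-count pruning (sort/while/pop/break) entirely: it groups indices by value in one pass with dict.setdefault and takes the plain maximum of the same per-value greedy over all groups.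
import Mathlib
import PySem

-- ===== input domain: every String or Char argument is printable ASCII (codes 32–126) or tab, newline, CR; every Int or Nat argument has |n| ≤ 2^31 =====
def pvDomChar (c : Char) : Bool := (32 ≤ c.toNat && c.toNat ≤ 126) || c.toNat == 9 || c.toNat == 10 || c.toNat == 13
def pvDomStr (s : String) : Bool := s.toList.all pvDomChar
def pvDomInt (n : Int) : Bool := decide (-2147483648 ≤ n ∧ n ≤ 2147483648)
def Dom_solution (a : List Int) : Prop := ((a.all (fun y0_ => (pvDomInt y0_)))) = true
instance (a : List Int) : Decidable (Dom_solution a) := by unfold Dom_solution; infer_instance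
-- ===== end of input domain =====

-- B re-implements A without the sort and the descending-count pruning: one grouping pass,
-- then the same greedy per group, taking the maximum (objective: simpler).

-- ===== PORT A =====
-- inner 'for index in index_list' loop of A; visited_index is a Python dict → PySem.Dict
def pvGreedyA (a : List Int) (number : Int) (idxs : List Int) : PySem.Dict Int Bool × Int :=
  idxs.foldl (fun s index =>
    if !(s.1.contains (index - 1)) && (PySem.List.pyGetD a (index - 1) 0 != number) then
      (s.1.insert (index - 1) true, s.2 + 2)
    else if !(s.1.contains (index + 1)) && (PySem.List.pyGetD a (index + 1) 0 != number) then
      (s.1.insert (index + 1) true, s.2 + 2)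
    else s)
    (((PySem.Dict.empty).insert (-1) true).insert (PySem.List.len a) true, 0)

-- 'while num_list: cur_list = num_list.pop(); … break …' — pop from the end = recursion over the reversed list
def pvWhileA (a : List Int) : List (Int × List Int × Int) → Int → Int
  | [], ret => ret
  | (number, idxs, cnt) :: rest, ret =>
    if ret ≥ cnt * 2 then ret
    else pvWhileA a rest (max ret (pvGreedyA a number idxs).2)

-- body of A's first loop: 'if a[i] in num_index: … append/+= … else: insert then append/+='
def pvStepA (a : List Int) (d : PySem.Dict Int (List Int × Int)) (i : Int) :
    PySem.Dict Int (List Int × Int) :=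
  match d.get? (PySem.List.pyGetD a i 0) with
  | some p => d.insert (PySem.List.pyGetD a i 0) (p.1 ++ [i], p.2 + 1)
  | none => d.insert (PySem.List.pyGetD a i 0) ([] ++ [i], 0 + 1)

def solution (a : List Int) : Int :=
  let numIndex : PySem.Dict Int (List Int × Int) :=
    (PySem.List.pyRange 0 (PySem.List.len a) 1).foldl (pvStepA a) PySem.Dict.empty
  let numList : List (Int × List Int × Int) :=
    numIndex.items.foldl (fun acc p => acc ++ [(p.1, p.2.1, p.2.2)]) []
  pvWhileA a ((PySem.List.sorted numList (fun x => x.2.2)).reverse) 0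

-- ===== PORT B =====
-- inner loop of _gain; visited is a Python set → PySem.Set
def pvGainB (a : List Int) (v : Int) (idxs : List Int) : PySem.Set Int × Int :=
  idxs.foldl (fun s i =>
    if !(PySem.Set.contains s.1 (i - 1)) && (PySem.List.pyGetD a (i - 1) 0 != v) then
      (PySem.Set.add s.1 (i - 1), s.2 + 2)
    else if !(PySem.Set.contains s.1 (i + 1)) && (PySem.List.pyGetD a (i + 1) 0 != v) then
      (PySem.Set.add s.1 (i + 1), s.2 + 2)
    else s)
    (PySem.Set.ofList [-1, PySem.List.len a], 0)

def solution_alt (a : List Int) : Int :=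
  let groups : PySem.Dict Int (List Int) :=
    -- 'groups.setdefault(v, []).append(i)' = modify v with default [] appending i
    (PySem.List.enumerate a).foldl (fun d p => d.modify p.2 [] (· ++ [p.1])) PySem.Dict.empty
  groups.items.foldl (fun best p => max best (pvGainB a p.1 p.2).2) 0

-- ===== PRECONDITION & SPEC =====
def Spec_solution (a : List Int) (out : Int) : Prop := out = solution_alt a
instance (a : List Int) (out : Int) : Decidable (Spec_solution a out) := by unfold Spec_solution; infer_instance

-- ===== CLAIM (what is proved, stated in full; the proofs are below) =====
def Claim_equal_solution : Prop := ∀ (a : List Int), Dom_solution a → Spec_solution a (solution a)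

-- ===== LEMMAS AND PROOFS =====

theorem set_contains_add (s : PySem.Set Int) (x y : Int) :
    PySem.Set.contains (PySem.Set.add s x) y = (y == x || PySem.Set.contains s y) := by
  rw [Bool.eq_iff_iff]
  simp only [PySem.Set.contains_iff, PySem.Set.mem_add, Bool.or_eq_true, beq_iff_eq,
    PySem.Set.contains_iff]
  tauto

theorem gainFold_eq (a : List Int) (v : Int) : ∀ (idxs : List Int) (dv : PySem.Dict Int Bool)
    (sv : PySem.Set Int) (ans : Int),
    (∀ x, dv.contains x = PySem.Set.contains sv x) →
    (idxs.foldl (fun s index =>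
      if !(s.1.contains (index - 1)) && (PySem.List.pyGetD a (index - 1) 0 != v) then
        (s.1.insert (index - 1) true, s.2 + 2)
      else if !(s.1.contains (index + 1)) && (PySem.List.pyGetD a (index + 1) 0 != v) then
        (s.1.insert (index + 1) true, s.2 + 2)
      else s) (dv, ans)).2
  = (idxs.foldl (fun s i =>
      if !(PySem.Set.contains s.1 (i - 1)) && (PySem.List.pyGetD a (i - 1) 0 != v) then
        (PySem.Set.add s.1 (i - 1), s.2 + 2)
      else if !(PySem.Set.contains s.1 (i + 1)) && (PySem.List.pyGetD a (i + 1) 0 != v) then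
        (PySem.Set.add s.1 (i + 1), s.2 + 2)
      else s) (sv, ans)).2 := by
  intro idxs
  induction idxs with
  | nil => intro _ _ _ _; rfl
  | cons i rest ih =>
    intro dv sv ans h
    simp only [List.foldl_cons]
    rw [h (i - 1), h (i + 1)]
    by_cases hc1 : (!(PySem.Set.contains sv (i - 1)) && (PySem.List.pyGetD a (i - 1) 0 != v)) = true
    · simp only [hc1, if_true]
      exact ih _ _ _ (fun x => by
        rw [PySem.Dict.contains_insert, set_contains_add, h x])
    · simp only [Bool.not_eq_true] at hc1
      simp only [hc1, Bool.false_eq_true, if_false]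
      by_cases hc2 : (!(PySem.Set.contains sv (i + 1)) && (PySem.List.pyGetD a (i + 1) 0 != v)) = true
      · simp only [hc2, if_true]
        exact ih _ _ _ (fun x => by
          rw [PySem.Dict.contains_insert, set_contains_add, h x])
      · simp only [Bool.not_eq_true] at hc2
        simp only [hc2, Bool.false_eq_true, if_false]
        exact ih _ _ _ h

theorem gainA_bound (a : List Int) (v : Int) : ∀ (idxs : List Int) (dv : PySem.Dict Int Bool)
    (ans : Int),
    ans ≤ (idxs.foldl (fun s index =>
      if !(s.1.contains (index - 1)) && (PySem.List.pyGetD a (index - 1) 0 != v) then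
        (s.1.insert (index - 1) true, s.2 + 2)
      else if !(s.1.contains (index + 1)) && (PySem.List.pyGetD a (index + 1) 0 != v) then
        (s.1.insert (index + 1) true, s.2 + 2)
      else s) (dv, ans)).2
  ∧ (idxs.foldl (fun s index =>
      if !(s.1.contains (index - 1)) && (PySem.List.pyGetD a (index - 1) 0 != v) then
        (s.1.insert (index - 1) true, s.2 + 2)
      else if !(s.1.contains (index + 1)) && (PySem.List.pyGetD a (index + 1) 0 != v) then
        (s.1.insert (index + 1) true, s.2 + 2)
      else s) (dv, ans)).2 ≤ ans + 2 * idxs.length := by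
  intro idxs
  induction idxs with
  | nil => intro _ ans; simp
  | cons i rest ih =>
    intro dv ans
    simp only [List.foldl_cons, List.length_cons]
    split_ifs with h1 h2
    · obtain ⟨l, r⟩ := ih (dv.insert (i - 1) true) (ans + 2)
      constructor
      · linarith
      · push_cast at r ⊢; linarith
    · obtain ⟨l, r⟩ := ih (dv.insert (i + 1) true) (ans + 2)
      constructor
      · linarith
      · push_cast at r ⊢; linarith
    · obtain ⟨l, r⟩ := ih dv ans
      constructor
      · linarith
      · push_cast at r ⊢; linarith

theorem foldl_max_eq_of_le {α : Type} (f : α → Int) : ∀ (L : List α) (r : Int),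
    (∀ e ∈ L, f e ≤ r) → L.foldl (fun r e => max r (f e)) r = r := by
  intro L
  induction L with
  | nil => intro r _; rfl
  | cons e rest ih =>
    intro r h
    simp only [List.foldl_cons]
    rw [max_eq_left (h e (List.mem_cons_self))]
    exact ih r (fun x hx => h x (List.mem_cons_of_mem _ hx))

theorem whileA_eq (a : List Int) : ∀ (L : List (Int × List Int × Int)),
    L.Pairwise (fun x y => y.2.2 ≤ x.2.2) →
    (∀ e ∈ L, e.2.2 = (e.2.1.length : Int)) → ∀ ret : Int,
    pvWhileA a L ret = L.foldl (fun r e => max r (pvGreedyA a e.1 e.2.1).2) ret := by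
  intro L
  induction L with
  | nil => intro _ _ _; rfl
  | cons e rest ih =>
    obtain ⟨n, idxs, c⟩ := e
    intro hp hc ret
    rw [List.pairwise_cons] at hp
    obtain ⟨hhead, htail⟩ := hp
    rw [pvWhileA]
    split_ifs with hbr
    · symm
      apply foldl_max_eq_of_le
      intro e he
      have hce : e.2.2 ≤ c := by
        rcases List.mem_cons.mp he with h | h
        · rw [h]
        · exact hhead e h
      have hlen := hc e he
      have hb := (gainA_bound a e.1 e.2.1
        (((PySem.Dict.empty).insert (-1) true).insert (PySem.List.len a) true) 0).2
      simp only [pvGreedyA]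
      omega
    · simp only [List.foldl_cons]
      exact ih htail (fun x hx => hc x (List.mem_cons_of_mem _ hx)) _

theorem A_dict_eq (a : List Int) :
    (PySem.List.pyRange 0 (PySem.List.len a) 1).foldl (pvStepA a) PySem.Dict.empty
  = (PySem.List.enumerate a).foldl
      (fun d p => d.modify p.2 ([], 0) (fun s => (s.1 ++ [p.1], s.2 + 1))) PySem.Dict.empty := by
  rw [PySem.List.enumerate_eq_map_pyRange a 0, List.foldl_map]
  refine congrArg (fun f => List.foldl f PySem.Dict.empty (PySem.List.pyRange 0 (PySem.List.len a))) ?_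
  funext d j
  simp only [pvStepA, PySem.Dict.modify, PySem.Dict.getD_eq_get?_getD]
  cases hg : d.get? (PySem.List.pyGetD a j 0) with
  | none => rfl
  | some p => rfl

theorem par_getD (l : List (Int × Int)) : ∀ (dB : PySem.Dict Int (List Int))
    (dA : PySem.Dict Int (List Int × Int)),
    (∀ v, dA.getD v ([], 0) = (dB.getD v [], ((dB.getD v []).length : Int))) → ∀ v,
    (l.foldl (fun d p => d.modify p.2 ([], 0) (fun s => (s.1 ++ [p.1], s.2 + 1))) dA).getD v ([], 0)
    = ((l.foldl (fun d p => d.modify p.2 [] (· ++ [p.1])) dB).getD v [],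
       (((l.foldl (fun d p => d.modify p.2 [] (· ++ [p.1])) dB).getD v []).length : Int)) := by
  induction l with
  | nil => intro dB dA h v; exact h v
  | cons p rest ih =>
    intro dB dA h v
    simp only [List.foldl_cons]
    apply ih
    intro w
    rw [PySem.Dict.getD_modify, PySem.Dict.getD_modify]
    by_cases hw : w = p.2
    · simp only [hw, if_true, h p.2, List.length_append]
      push_cast
      rfl
    · simp only [hw, if_false, h w]

theorem gain_eq (a : List Int) (v : Int) (idxs : List Int) :
    (pvGreedyA a v idxs).2 = (pvGainB a v idxs).2 := by
  simp only [pvGreedyA, pvGainB]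
  apply gainFold_eq
  intro x
  rw [Bool.eq_iff_iff]
  simp only [PySem.Dict.contains_insert, PySem.Dict.contains_empty, PySem.Set.contains_iff,
    PySem.Set.mem_ofList, Bool.or_eq_true, beq_iff_eq, Bool.false_eq_true, List.mem_cons,
    List.not_mem_nil]
  tauto

-- ===== VERDICT (by name: the statement is the Claim_ definition above) =====
theorem solution_spec : Claim_equal_solution := by
  intro a _
  unfold Spec_solution
  show solution a = solution_alt a
  simp only [solution, solution_alt]
  rw [A_dict_eq a]
  set dB : PySem.Dict Int (List Int) := (PySem.List.enumerate a).foldl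
    (fun d p => d.modify p.2 [] (· ++ [p.1])) PySem.Dict.empty with hdB
  set dA : PySem.Dict Int (List Int × Int) := (PySem.List.enumerate a).foldl
    (fun d p => d.modify p.2 ([], 0) (fun s => (s.1 ++ [p.1], s.2 + 1))) PySem.Dict.empty with hdA
  have hnodupB : dB.keys.Nodup := by
    rw [hdB]
    exact PySem.Dict.nodup_keys_foldl_modify_key _ _ _ _ _ PySem.Dict.nodup_keys_empty
  have hnodupA : dA.keys.Nodup := by
    rw [hdA]
    exact PySem.Dict.nodup_keys_foldl_modify_key _ _ _ _ _ PySem.Dict.nodup_keys_empty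
  have hkeysA : dA.keys = dB.keys := by
    rw [hdA, hdB, PySem.Dict.keys_foldl_modify_key, PySem.Dict.keys_foldl_modify_key]
    rfl
  have hgetD : ∀ v, dA.getD v ([], 0) = (dB.getD v [], ((dB.getD v []).length : Int)) := by
    rw [hdA, hdB]
    exact par_getD _ _ _ (fun v => by simp [PySem.Dict.getD_empty])
  have hitemsA : dA.items
      = dB.keys.map (fun k => (k, (dB.getD k [], ((dB.getD k []).length : Int)))) := by
    rw [PySem.Dict.items_eq_map_keys dA hnodupA ([], 0), hkeysA]
    exact List.map_congr_left (fun k _ => by rw [hgetD k])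
  have hitemsB : dB.items = dB.keys.map (fun k => (k, dB.getD k [])) :=
    PySem.Dict.items_eq_map_keys dB hnodupB []
  have hnum : (dA.items.foldl (fun acc p => acc ++ [(p.1, p.2.1, p.2.2)]) ([] : List (Int × List Int × Int)))
      = dB.keys.map (fun k => (k, dB.getD k [], ((dB.getD k []).length : Int))) := by
    rw [PySem.List.foldl_append_singleton_eq_map, List.nil_append, hitemsA, List.map_map]
    rfl
  set numList : List (Int × List Int × Int) :=
    dA.items.foldl (fun acc p => acc ++ [(p.1, p.2.1, p.2.2)]) [] with hnumList
  have hmemc : ∀ e ∈ numList, e.2.2 = (e.2.1.length : Int) := by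
    rw [hnum]
    intro e he
    obtain ⟨k, _, rfl⟩ := List.mem_map.mp he
    rfl
  have hpair : ((PySem.List.sorted numList (fun x => x.2.2)).reverse).Pairwise
      (fun x y => y.2.2 ≤ x.2.2) := by
    rw [List.pairwise_reverse]
    exact PySem.List.sorted_pairwise _ _
  rw [whileA_eq a _ hpair (fun e he => hmemc e
    ((PySem.List.mem_sorted numList (fun x => x.2.2) false e).mp (List.mem_reverse.mp he))) 0]
  have hperm : ((PySem.List.sorted numList (fun x => x.2.2)).reverse).Perm numList :=
    (List.reverse_perm _).trans (PySem.List.sorted_perm _ _ _)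
  have hfold : List.foldl (fun (r : Int) e => max r (pvGreedyA a e.1 e.2.1).2) 0
      ((PySem.List.sorted numList (fun x => x.2.2)).reverse)
      = List.foldl (fun (r : Int) e => max r (pvGreedyA a e.1 e.2.1).2) 0 numList :=
    List.Perm.foldl_eq (rcomm := ⟨fun (b : Int) x y =>
      max_right_comm b (pvGreedyA a x.1 x.2.1).2 (pvGreedyA a y.1 y.2.1).2⟩) hperm 0
  rw [hfold]
  rw [hnum, hitemsB, List.foldl_map, List.foldl_map]
  have hfun : (fun (r : Int) (k : Int) => max r (pvGreedyA a k (dB.getD k [])).2)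
      = (fun (r : Int) (k : Int) => max r (pvGainB a k (dB.getD k [])).2) := by
    funext r k
    rw [gain_eq]
  rw [hfun]
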